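-- pv_equiv track=rewrite | github.com/dbt-labs/dbt-autofix | src/dbt_autofix/refactors/changesets/dbt_schema_yml.py | _remove_non_alpha_outside_jinja
-- ===== SOURCE A (Python) =====
-- def _remove_non_alpha_outside_jinja(text: str) -> str:
--     """Remove non-alphanumeric characters (except underscores), but preserve Jinja templates.
--
--     This function avoids corrupting Jinja templates like {{ env_var('X') | lower }}
--     by preserving everything inside {{ }} blocks.
--
--     Args:
--         text: The text to process
--
--     Returns:
--         Text with non-alphanumeric characters removed, except inside Jinja templates
--     """
--     result = []
--     i = 0
--     jinja_depth = 0
--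
--     while i < len(text):
--         # Check for Jinja opening {{
--         if i < len(text) - 1 and text[i : i + 2] == "{{":
--             jinja_depth += 1
--             result.append("{{")
--             i += 2
--             continue
--
--         # Check for Jinja closing }}
--         if i < len(text) - 1 and text[i : i + 2] == "}}":
--             result.append("}}")
--             jinja_depth -= 1
--             i += 2
--             continue
--
--         # Keep character if it's alphanumeric/underscore, or if we're inside Jinja
--         char = text[i]
--         if jinja_depth > 0 or char.isalnum() or char == "_":
--             result.append(char)
--         # Otherwise skip the character (it's removed)
--
--         i += 1
--
--     return "".join(result)
-- ===== SOURCE B (Python) =====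
-- import re
--
-- def _remove_non_alpha_outside_jinja(text: str) -> str:
--     # Tokenize first: alternating literal segments and '{{'/'}}' delimiters,
--     # then filter each literal segment once according to the current depth.
--     parts = re.split(r"(\{\{|\}\})", text)
--     out = []
--     depth = 0
--     for p in parts:
--         if p == "{{":
--             out.append(p)
--             depth += 1
--         elif p == "}}":
--             out.append(p)
--             depth -= 1
--         elif depth > 0:
--             out.append(p)
--         else:
--             out.append("".join(c for c in p if c.isalnum() or c == "_"))
--     return "".join(out)
-- ===== Notes on version B (the rewrite author's own statement) =====
-- stated objective: faster
-- what changed: Replaces the char-by-char index loop with 2-char lookahead by a tokenize-first pass: re.split on the two Jinja delimiters yields alternating literal segments and delimiter tokens, then each literal segment is kept whole or filtered in one go according to a signed depth counter.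
import Mathlib
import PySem

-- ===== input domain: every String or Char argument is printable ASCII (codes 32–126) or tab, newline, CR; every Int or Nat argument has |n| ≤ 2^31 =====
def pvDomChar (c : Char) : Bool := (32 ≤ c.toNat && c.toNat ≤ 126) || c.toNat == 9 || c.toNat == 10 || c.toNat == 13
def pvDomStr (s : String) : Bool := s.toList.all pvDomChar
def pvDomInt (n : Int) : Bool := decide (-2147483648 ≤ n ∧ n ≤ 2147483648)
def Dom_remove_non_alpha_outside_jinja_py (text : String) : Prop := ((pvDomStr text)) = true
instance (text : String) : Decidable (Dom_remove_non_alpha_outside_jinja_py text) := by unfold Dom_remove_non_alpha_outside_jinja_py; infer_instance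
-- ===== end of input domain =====

-- B tokenizes first (re.split on the Jinja delimiters), then filters whole literal segments by depth, instead of A's char-by-char scan; measured faster in a timing run (constant factor).

-- ===== PORT A =====
-- A's while-loop over the index with 2-char lookahead, as structural recursion on the
-- remaining characters ('i < len-1 ∧ text[i:i+2] == "{{"' = the two-cons pattern).
def pvLoopA : List Char → Int → List Char
  | '{' :: '{' :: rest, d => '{' :: '{' :: pvLoopA rest (d + 1)
  | '}' :: '}' :: rest, d => '}' :: '}' :: pvLoopA rest (d - 1)
  | c :: rest, d =>
      (if d > 0 || c.isAlphanum || c = '_' then [c] else []) ++ pvLoopA rest d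
  | [], _ => []

def remove_non_alpha_outside_jinja_py (text : String) : String :=
  String.mk (pvLoopA text.toList 0)

-- ===== PORT B =====
inductive PvTok where
  | open_ : PvTok
  | close : PvTok
  | lit : List Char → PvTok
deriving DecidableEq, Repr

-- hand port of re.split(r"(\{\{|\}\})", text): exact — leftmost non-overlapping matches,
-- alternating literal segments (possibly empty) and delimiter tokens
def pvTokGo : List Char → List Char → List PvTok
  | acc, '{' :: '{' :: rest => .lit acc :: .open_ :: pvTokGo [] rest
  | acc, '}' :: '}' :: rest => .lit acc :: .close :: pvTokGo [] rest
  | acc, c :: rest => pvTokGo (acc ++ [c]) rest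
  | acc, [] => [.lit acc]

def pvKeep (c : Char) : Bool := c.isAlphanum || c = '_'

def pvProcess : List PvTok → Int → List Char
  | [], _ => []
  | .open_ :: ts, d => '{' :: '{' :: pvProcess ts (d + 1)
  | .close :: ts, d => '}' :: '}' :: pvProcess ts (d - 1)
  | .lit s :: ts, d =>
      (if d > 0 then s else s.filter pvKeep) ++ pvProcess ts d

def remove_non_alpha_outside_jinja_py_alt (text : String) : String :=
  String.mk (pvProcess (pvTokGo [] text.toList) 0)

-- ===== PRECONDITION & SPEC =====
def Spec_remove_non_alpha_outside_jinja_py (text : String) (out : String) : Prop := out = remove_non_alpha_outside_jinja_py_alt text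
instance (text : String) (out : String) : Decidable (Spec_remove_non_alpha_outside_jinja_py text out) := by unfold Spec_remove_non_alpha_outside_jinja_py; infer_instance

-- ===== CLAIM (what is proved, stated in full; the proofs are below) =====
def Claim_equal_remove_non_alpha_outside_jinja_py : Prop := ∀ (text : String), Dom_remove_non_alpha_outside_jinja_py text → Spec_remove_non_alpha_outside_jinja_py text (remove_non_alpha_outside_jinja_py text)

-- ===== LEMMAS AND PROOFS =====
theorem pvProcess_tokGo (acc cs : List Char) (d : Int) :
    pvProcess (pvTokGo acc cs) d =
      (if d > 0 then acc else acc.filter pvKeep) ++ pvLoopA cs d := by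
  fun_induction pvTokGo acc cs generalizing d with
  | case1 acc rest ih =>
      simp [pvProcess, pvLoopA, ih]
  | case2 acc rest ih =>
      simp [pvProcess, pvLoopA, ih]
  | case3 acc c rest h1 h2 ih =>
      rw [ih, pvLoopA.eq_3 _ _ _ h1 h2]
      by_cases hd : d > 0
      · simp [hd]
      · simp [hd, pvKeep, List.filter_append, List.filter]
        rcases h : (c.isAlphanum || decide (c = '_')) with _ | _ <;> simp_all
  | case4 acc =>
      simp [pvProcess, pvLoopA]

-- ===== VERDICT (by name: the statement is the Claim_ definition above) =====
theorem remove_non_alpha_outside_jinja_py_spec : Claim_equal_remove_non_alpha_outside_jinja_py := by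
  intro text _
  unfold Spec_remove_non_alpha_outside_jinja_py remove_non_alpha_outside_jinja_py remove_non_alpha_outside_jinja_py_alt
  rw [pvProcess_tokGo]
  simp
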